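-- pv_equiv track=rewrite | github.com/conormccauley1999/CompetitiveProgramming | ProjectEuler/051-100/088.py | g
-- ===== SOURCE A (Python) =====
-- _g = {}
--
-- def g(goal, cur_prod, cur_sum, vals_left, min_divisor):
--     key = (goal, cur_prod, cur_sum, vals_left,)
--     if key in _g:
--         return _g[key]
--     if goal == cur_prod and goal == cur_sum and vals_left == 0:
--         result = True
--     elif cur_prod > goal or cur_sum > goal:
--         result = False
--     elif vals_left == 0 and (cur_prod != goal or cur_sum != goal):
--         result = False
--     elif cur_prod != goal and cur_sum == goal:
--         result = False
--     elif goal % cur_prod != 0: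
--         result = False
--     else:
--         for divisor in range(min_divisor, goal):
--             if goal % divisor == 0 and g(goal, cur_prod * divisor, cur_sum + divisor, vals_left - 1, divisor):
--                 _g[key] = True
--                 return True
--         result = False
--     _g[key] = result
--     return result
-- ===== SOURCE B (Python) =====
-- def _walk(goal, ds, p, s, v):
--     # choose-or-skip over the precomputed nondecreasing divisor list:
--     # either use ds[0] once more (it may be reused) or drop it for good.
--     if v == 0:
--         return p == goal and s == goal
--     if not ds:
--         return False
--     d = ds[0]
--     if goal % (p * d) == 0 and p * d <= goal and s + d <= goal and _walk(goal, ds, p * d, s + d, v - 1):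
--         return True
--     return _walk(goal, ds[1:], p, s, v)
--
-- def g(goal, cur_prod, cur_sum, vals_left, min_divisor):
--     if vals_left == 0:
--         return cur_prod == goal and cur_sum == goal
--     if cur_prod > goal or cur_sum > goal or (cur_sum == goal and cur_prod != goal) or goal % cur_prod:
--         return False
--     divs = [d for d in range(min_divisor, goal) if goal % d == 0]
--     return _walk(goal, divs, cur_prod, cur_sum, vals_left)
-- ===== Notes on version B (the rewrite author's own statement) =====
-- stated objective: alternative
-- what changed: A's per-call guard cascade plus an inner range(min_divisor, goal) loop at every recursion level is replaced by precomputing the sorted divisor list of goal once and running a choose-or-skip (coin-change style) binary recursion over that list with a single combined feasibility guard on the child state; A's module-level memo _g is a mutable cross-call side effect that is not reproduced.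
import Mathlib
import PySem

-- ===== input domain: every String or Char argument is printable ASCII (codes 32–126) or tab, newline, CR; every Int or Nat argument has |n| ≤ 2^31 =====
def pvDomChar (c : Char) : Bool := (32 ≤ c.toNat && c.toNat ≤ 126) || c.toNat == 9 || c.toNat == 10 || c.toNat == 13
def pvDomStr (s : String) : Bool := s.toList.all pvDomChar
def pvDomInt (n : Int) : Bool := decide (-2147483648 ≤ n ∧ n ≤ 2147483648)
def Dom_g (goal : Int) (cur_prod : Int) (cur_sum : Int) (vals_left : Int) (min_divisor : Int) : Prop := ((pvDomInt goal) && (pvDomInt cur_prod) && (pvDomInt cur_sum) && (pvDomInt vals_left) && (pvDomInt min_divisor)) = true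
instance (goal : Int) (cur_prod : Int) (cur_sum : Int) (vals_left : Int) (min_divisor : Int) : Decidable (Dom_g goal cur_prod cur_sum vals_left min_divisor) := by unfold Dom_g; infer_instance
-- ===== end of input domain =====

-- B precomputes the divisor list of goal once and replaces A's per-level guard cascade + range
-- loop by a choose-or-skip recursion over that list (alternative decomposition, similar cost);
-- A's module-level memo `_g` (a mutable cross-call cache) is not modelled: the equivalence is
-- about the return value of a call evaluated without that cache.

-- ===== PORT A =====
-- literal port of A's recursion; the Nat fuel only makes the recursion structural
-- (inside Pre_g it is provably sufficient, see `gAuxA_stable`); memo omitted as stated above.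
def gAuxA (goal : Int) : Nat → Int → Int → Int → Int → Bool
  | 0, _, _, _, _ => false
  | fuel+1, p, s, v, m =>
    if p = goal ∧ s = goal ∧ v = 0 then true
    else if p > goal ∨ s > goal then false
    else if v = 0 ∧ (p ≠ goal ∨ s ≠ goal) then false
    else if p ≠ goal ∧ s = goal then false
    else if PySem.Int.mod goal p ≠ 0 then false
    else (PySem.List.pyRange m goal 1).any
      (fun d => decide (PySem.Int.mod goal d = 0) && gAuxA goal fuel (p*d) (s+d) (v-1) d)

def g (goal : Int) (cur_prod : Int) (cur_sum : Int) (vals_left : Int) (min_divisor : Int) : Bool :=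
  gAuxA goal ((goal - cur_sum).toNat + 2) cur_prod cur_sum vals_left min_divisor

-- ===== PORT B =====
-- literal port of B's `_walk`: choose-or-skip over the precomputed divisor list; the Nat fuel
-- only makes the recursion structural (inside Pre_g it is provably sufficient, see `walk_eq`).
def walkAux (goal : Int) : Nat → List Int → Int → Int → Int → Bool
  | 0, _, _, _, _ => false
  | fuel+1, ds, p, s, v =>
    if v = 0 then decide (p = goal) && decide (s = goal)
    else
      match ds with
      | [] => false
      | d :: rest =>
        (decide (PySem.Int.mod goal (p * d) = 0) && decide (p * d ≤ goal) && decide (s + d ≤ goal)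
          && walkAux goal fuel (d :: rest) (p * d) (s + d) (v - 1))
        || walkAux goal fuel rest p s v

def g_alt (goal : Int) (cur_prod : Int) (cur_sum : Int) (vals_left : Int) (min_divisor : Int) : Bool :=
  if vals_left = 0 then decide (cur_prod = goal) && decide (cur_sum = goal)
  else if cur_prod > goal ∨ cur_sum > goal ∨ (cur_sum = goal ∧ cur_prod ≠ goal) ∨ PySem.Int.mod goal cur_prod ≠ 0 then false
  else
    let divs := (PySem.List.pyRange min_divisor goal 1).filter (fun d => decide (PySem.Int.mod goal d = 0))
    walkAux goal (divs.length + (goal - cur_sum).toNat + 2) divs cur_prod cur_sum vals_left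

-- ===== PRECONDITION & SPEC =====
-- Pre_g admits the natural recursive region (min_divisor ≥ 1 and cur_prod ≠ 0), every input the
-- guard cascade decides before the divisor loop, every input whose divisor loop is empty
-- (goal ≤ min_divisor) and every goal ≤ 0 (all divisors negative, recursion depth ≤ 2).
-- Excluded inputs are exactly those where Python A raises: ZeroDivisionError (cur_prod == 0
-- reaching `goal % cur_prod`, or divisor 0 reached by a loop started at min_divisor ≤ 0 < goal)
-- or unbounded recursion through negative divisors (RecursionError).
def Pre_g (goal : Int) (cur_prod : Int) (cur_sum : Int) (vals_left : Int) (min_divisor : Int) : Prop :=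
  (1 ≤ min_divisor ∧ cur_prod ≠ 0) ∨
  (cur_prod = goal ∧ cur_sum = goal ∧ vals_left = 0) ∨
  cur_prod > goal ∨ cur_sum > goal ∨ vals_left = 0 ∨
  (cur_prod ≠ goal ∧ cur_sum = goal) ∨
  (cur_prod ≠ 0 ∧ PySem.Int.mod goal cur_prod ≠ 0) ∨
  (cur_prod ≠ 0 ∧ goal ≤ min_divisor) ∨
  (cur_prod ≠ 0 ∧ goal ≤ 0)
instance (goal : Int) (cur_prod : Int) (cur_sum : Int) (vals_left : Int) (min_divisor : Int) : Decidable (Pre_g goal cur_prod cur_sum vals_left min_divisor) := by unfold Pre_g; infer_instance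

def pvWitness_g : Int × Int × Int × Int × Int := (12, 1, 0, 3, 1)

def Spec_g (goal : Int) (cur_prod : Int) (cur_sum : Int) (vals_left : Int) (min_divisor : Int) (out : Bool) : Prop := out = g_alt goal cur_prod cur_sum vals_left min_divisor
instance (goal : Int) (cur_prod : Int) (cur_sum : Int) (vals_left : Int) (min_divisor : Int) (out : Bool) : Decidable (Spec_g goal cur_prod cur_sum vals_left min_divisor out) := by unfold Spec_g; infer_instance

-- ===== CLAIM (what is proved, stated in full; the proofs are below) =====
def Claim_equal_g : Prop := ∀ (goal : Int) (cur_prod : Int) (cur_sum : Int) (vals_left : Int) (min_divisor : Int), Dom_g goal cur_prod cur_sum vals_left min_divisor → Pre_g goal cur_prod cur_sum vals_left min_divisor → Spec_g goal cur_prod cur_sum vals_left min_divisor (g goal cur_prod cur_sum vals_left min_divisor)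

-- ===== LEMMAS AND PROOFS =====

lemma gAuxA_succ (goal : Int) (f : Nat) (p s v m : Int) :
    gAuxA goal (f+1) p s v m =
    (if p = goal ∧ s = goal ∧ v = 0 then true
     else if p > goal ∨ s > goal then false
     else if v = 0 ∧ (p ≠ goal ∨ s ≠ goal) then false
     else if p ≠ goal ∧ s = goal then false
     else if PySem.Int.mod goal p ≠ 0 then false
     else (PySem.List.pyRange m goal 1).any
       (fun d => decide (PySem.Int.mod goal d = 0) && gAuxA goal f (p*d) (s+d) (v-1) d)) := rfl

lemma walk_succ_nil (goal : Int) (f : Nat) (p s v : Int) :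
    walkAux goal (f+1) [] p s v =
    (if v = 0 then decide (p = goal) && decide (s = goal) else false) := rfl

lemma walk_succ_cons (goal : Int) (f : Nat) (d : Int) (rest : List Int) (p s v : Int) :
    walkAux goal (f+1) (d :: rest) p s v =
    (if v = 0 then decide (p = goal) && decide (s = goal)
     else
       (decide (PySem.Int.mod goal (p * d) = 0) && decide (p * d ≤ goal) && decide (s + d ≤ goal)
         && walkAux goal f (d :: rest) (p * d) (s + d) (v - 1))
       || walkAux goal f rest p s v) := rfl

lemma gAuxA_hi (goal : Int) (f : Nat) (p s v m : Int) (h : goal < s) :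
    gAuxA goal (f+1) p s v m = false := by
  rw [gAuxA_succ]
  rw [if_neg (by rintro ⟨-, h2, -⟩; omega), if_pos (Or.inr h)]

lemma anyCongr {l : List Int} {f g' : Int → Bool} (h : ∀ x ∈ l, f x = g' x) :
    l.any f = l.any g' := by
  induction l with
  | nil => rfl
  | cons a t ih =>
    simp only [List.any_cons, h a (by simp)]
    rw [ih (fun x hx => h x (by simp [hx]))]

lemma gAuxA_stable (goal : Int) : ∀ (M : Nat) (f₁ f₂ : Nat) (p s v m : Int),
    (goal - s).toNat ≤ M → 1 ≤ m → M + 2 ≤ f₁ → M + 2 ≤ f₂ →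
    gAuxA goal f₁ p s v m = gAuxA goal f₂ p s v m := by
  intro M
  induction M with
  | zero =>
    intro f₁ f₂ p s v m hM hm h1 h2
    obtain ⟨a, rfl⟩ : ∃ a, f₁ = a + 1 := ⟨f₁ - 1, by omega⟩
    obtain ⟨b, rfl⟩ : ∃ b, f₂ = b + 1 := ⟨f₂ - 1, by omega⟩
    rw [gAuxA_succ, gAuxA_succ]
    split_ifs with g1 g2 g3 g4 g5 <;> try rfl
    apply anyCongr
    intro d hd
    rw [PySem.List.mem_pyRange_one] at hd
    have hsd : goal < s + d := by
      rcases not_or.1 g2 with ⟨-, hs⟩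
      omega
    obtain ⟨a', rfl⟩ : ∃ a', a = a' + 1 := ⟨a - 1, by omega⟩
    obtain ⟨b', rfl⟩ : ∃ b', b = b' + 1 := ⟨b - 1, by omega⟩
    rw [gAuxA_hi goal a' _ _ _ _ hsd, gAuxA_hi goal b' _ _ _ _ hsd]
  | succ M ih =>
    intro f₁ f₂ p s v m hM hm h1 h2
    obtain ⟨a, rfl⟩ : ∃ a, f₁ = a + 1 := ⟨f₁ - 1, by omega⟩
    obtain ⟨b, rfl⟩ : ∃ b, f₂ = b + 1 := ⟨f₂ - 1, by omega⟩
    rw [gAuxA_succ, gAuxA_succ]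
    split_ifs with g1 g2 g3 g4 g5 <;> try rfl
    apply anyCongr
    intro d hd
    rw [PySem.List.mem_pyRange_one] at hd
    have hs : s ≤ goal := by rcases not_or.1 g2 with ⟨-, hs⟩; omega
    by_cases hsd : goal < s + d
    · obtain ⟨a', rfl⟩ : ∃ a', a = a' + 1 := ⟨a - 1, by omega⟩
      obtain ⟨b', rfl⟩ : ∃ b', b = b' + 1 := ⟨b - 1, by omega⟩
      rw [gAuxA_hi goal a' _ _ _ _ hsd, gAuxA_hi goal b' _ _ _ _ hsd]
    · have := ih a b (p*d) (s+d) (v-1) d (by omega) (by omega) (by omega) (by omega)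
      rw [this]

lemma gAuxA_neg (goal : Int) (hg : goal ≤ 0) : ∀ (f : Nat) (p s v m : Int),
    ¬(p = goal ∧ s = goal ∧ v = 0) → gAuxA goal f p s v m = false := by
  intro f
  induction f with
  | zero => intros; rfl
  | succ f ih =>
    intro p s v m h1
    rw [gAuxA_succ, if_neg h1]
    split_ifs with g2 g3 g4 g5 <;> try rfl
    rw [List.any_eq_false]
    intro d hd
    rw [PySem.List.mem_pyRange_one] at hd
    have hs : s ≤ goal := by rcases not_or.1 g2 with ⟨-, hs⟩; omega
    have : ¬((p*d) = goal ∧ (s+d) = goal ∧ (v-1) = 0) := by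
      rintro ⟨-, h2', -⟩; omega
    rw [ih (p*d) (s+d) (v-1) d this]
    simp

-- B's walk returns false when every element of the list fails the combined child guard.
lemma walk_false (goal : Int) : ∀ (f : Nat) (ds : List Int) (p s v : Int), v ≠ 0 →
    (∀ d ∈ ds, ¬(PySem.Int.mod goal (p*d) = 0 ∧ p*d ≤ goal ∧ s+d ≤ goal)) →
    walkAux goal f ds p s v = false := by
  intro f
  induction f with
  | zero => intros; rfl
  | succ f ih =>
    rintro (_ | ⟨d, rest⟩) p s v hv hg
    · rw [walk_succ_nil, if_neg hv]
    · rw [walk_succ_cons, if_neg hv]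
      have hd := hg d (by simp)
      have hguard : (decide (PySem.Int.mod goal (p*d) = 0) && decide (p*d ≤ goal) && decide (s+d ≤ goal)) = false := by
        rcases Classical.em (PySem.Int.mod goal (p*d) = 0) with h1 | h1
        · rcases Classical.em (p*d ≤ goal) with h2 | h2
          · have h3 : ¬(s+d ≤ goal) := fun h3 => hd ⟨h1, h2, h3⟩
            simp [h3]
          · simp [h2]
        · simp [h1]
      rw [show (decide (PySem.Int.mod goal (p*d) = 0) && decide (p*d ≤ goal) && decide (s+d ≤ goal)
            && walkAux goal f (d :: rest) (p*d) (s+d) (v-1))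
          = ((decide (PySem.Int.mod goal (p*d) = 0) && decide (p*d ≤ goal) && decide (s+d ≤ goal))
            && walkAux goal f (d :: rest) (p*d) (s+d) (v-1)) from by
        simp [Bool.and_assoc]]
      rw [hguard, Bool.false_and, Bool.false_or]
      exact ih rest p s v hv (fun d' hd' => hg d' (by simp [hd']))

-- the divisor list of goal from lower bound k, exactly as built by B
def divsFrom (goal k : Int) : List Int :=
  (PySem.List.pyRange k goal 1).filter (fun d => decide (PySem.Int.mod goal d = 0))

lemma mem_divsFrom {goal k d : Int} (h : d ∈ divsFrom goal k) :
    k ≤ d ∧ d < goal ∧ PySem.Int.mod goal d = 0 := by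
  obtain ⟨hr, hq⟩ := List.mem_filter.1 h
  rw [PySem.List.mem_pyRange_one] at hr
  exact ⟨hr.1, hr.2, by simpa using hq⟩

lemma divsFrom_nil {goal k : Int} (h : goal ≤ k) : divsFrom goal k = [] := by
  unfold divsFrom
  rw [PySem.List.pyRange_one_eq_nil h]
  rfl

-- MAIN LEMMA: inside the recursive region (goal > 0, lower bound ≥ 1, state passes A's guards)
-- B's choose-or-skip walk over the divisor list equals A's divisor loop of gAuxA children.
lemma walk_eq (goal : Int) (hg : 0 < goal) :
    ∀ (F : Nat), ∀ (n : Nat) (k p s v : Int),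
    (goal - k).toNat ≤ n → 1 ≤ k → p ≠ 0 → v ≠ 0 → p ≤ goal → s ≤ goal →
    ¬(s = goal ∧ p ≠ goal) → PySem.Int.mod goal p = 0 →
    (divsFrom goal k).length + (goal - s).toNat + 2 ≤ F →
    walkAux goal F (divsFrom goal k) p s v
      = (PySem.List.pyRange k goal 1).any
          (fun d => decide (PySem.Int.mod goal d = 0) && gAuxA goal ((goal - s).toNat + 1) (p*d) (s+d) (v-1) d) := by
  intro F
  induction F using Nat.strong_induction_on with
  | _ F ihF =>
    intro n
    induction n with
    | zero =>
      intro k p s v hkn h1k hp0 hv hpg hsg hsp hmod hF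
      have hk : goal ≤ k := by omega
      rw [divsFrom_nil hk, PySem.List.pyRange_one_eq_nil hk]
      obtain ⟨f, rfl⟩ : ∃ f, F = f + 1 := ⟨F - 1, by omega⟩
      rw [walk_succ_nil, if_neg hv]
      rfl
    | succ n ihn =>
      intro k p s v hkn h1k hp0 hv hpg hsg hsp hmod hF
      by_cases hk : goal ≤ k
      · rw [divsFrom_nil hk, PySem.List.pyRange_one_eq_nil hk]
        obtain ⟨f, rfl⟩ : ∃ f, F = f + 1 := ⟨F - 1, by omega⟩
        rw [walk_succ_nil, if_neg hv]
        rfl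
      · have hkg : k < goal := by omega
        have hcons : PySem.List.pyRange k goal 1 = k :: PySem.List.pyRange (k+1) goal 1 :=
          PySem.List.pyRange_one_cons hkg
        by_cases hdk : PySem.Int.mod goal k = 0
        · -- k is a divisor: head of the list
          have hds : divsFrom goal k = k :: divsFrom goal (k+1) := by
            unfold divsFrom
            rw [hcons, List.filter_cons, if_pos (by simpa using hdk)]
          obtain ⟨f, rfl⟩ : ∃ f, F = f + 1 := ⟨F - 1, by omega⟩
          have hlen : (divsFrom goal (k+1)).length + 1 = (divsFrom goal k).length := by
            rw [hds]; rfl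
          have htail : walkAux goal f (divsFrom goal (k+1)) p s v
              = (PySem.List.pyRange (k+1) goal 1).any
                  (fun d => decide (PySem.Int.mod goal d = 0) && gAuxA goal ((goal - s).toNat + 1) (p*d) (s+d) (v-1) d) := by
            exact ihF f (by omega) ((goal - (k+1)).toNat) (k+1) p s v (by omega) (by omega)
              hp0 hv hpg hsg hsp hmod (by omega)
          have hhead : (decide (PySem.Int.mod goal (p * k) = 0) && decide (p * k ≤ goal) && decide (s + k ≤ goal)
                && walkAux goal f (k :: divsFrom goal (k+1)) (p * k) (s + k) (v - 1))
              = gAuxA goal ((goal - s).toNat + 1) (p*k) (s+k) (v-1) k := by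
            rw [show (goal - s).toNat + 1 = (goal - s).toNat + 1 from rfl, gAuxA_succ]
            split_ifs with g1 g2 g3 g4 g5
            · -- full success at the child
              obtain ⟨he1, he2, he3⟩ := g1
              have hm0 : PySem.Int.mod goal goal = 0 :=
                (PySem.Int.mod_eq_zero_iff_dvd goal goal).2 dvd_rfl
              obtain ⟨f', rfl⟩ : ∃ f', f = f' + 1 := ⟨f - 1, by omega⟩
              rw [walk_succ_cons, if_pos he3]
              simp [he1, he2, hm0]
            · -- child pruned: product or sum exceeds goal
              rcases g2 with h | h
              · simp [show ¬(p*k ≤ goal) from by omega]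
              · simp [show ¬(s+k ≤ goal) from by omega]
            · -- vals exhausted but not both equal
              obtain ⟨hv1, hv2⟩ := g3
              have hbase : (decide (p*k = goal) && decide (s+k = goal)) = false := by
                rcases hv2 with h | h <;> simp [h]
              obtain ⟨f', rfl⟩ : ∃ f', f = f' + 1 := ⟨f - 1, by omega⟩
              rw [walk_succ_cons, if_pos hv1, hbase]
              simp
            · -- sum hit goal early: every further use overshoots
              obtain ⟨hne, hsum⟩ := g4
              have hv1 : v - 1 ≠ 0 := by
                intro h
                exact g3 ⟨h, Or.inl hne⟩
              have : walkAux goal f (k :: divsFrom goal (k+1)) (p*k) (s+k) (v-1) = false := by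
                apply walk_false goal f _ _ _ _ hv1
                intro d' hd'
                have h1 : 1 ≤ d' := by
                  rcases List.mem_cons.1 hd' with h | h
                  · omega
                  · have := mem_divsFrom h; omega
                rintro ⟨-, -, h3⟩
                omega
              rw [this]
              simp
            · -- child product does not divide goal
              simp [g5]
            · -- recursive case: both sides recurse over divisors ≥ k
              have hm0 : PySem.Int.mod goal (p*k) = 0 := by
                simpa using g5
              have hple : p*k ≤ goal := by
                rcases not_or.1 g2 with ⟨h, -⟩; omega
              have hsle : s+k ≤ goal := by
                rcases not_or.1 g2 with ⟨-, h⟩; omega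
              have hv1 : v - 1 ≠ 0 := by
                intro h
                rcases Classical.em (p*k = goal) with he | he
                · rcases Classical.em (s+k = goal) with he2 | he2
                  · exact g1 ⟨he, he2, h⟩
                  · exact g3 ⟨h, Or.inr he2⟩
                · exact g3 ⟨h, Or.inl he⟩
              have hrec : walkAux goal f (divsFrom goal k) (p*k) (s+k) (v-1)
                  = (PySem.List.pyRange k goal 1).any
                      (fun d => decide (PySem.Int.mod goal d = 0) && gAuxA goal ((goal - (s+k)).toNat + 1) ((p*k)*d) ((s+k)+d) ((v-1)-1) d) := by
                exact ihF f (by omega) ((goal - k).toNat) k (p*k) (s+k) (v-1) (le_refl _) h1k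
                  (by positivity) hv1 hple hsle (fun hh => g4 ⟨hh.2, hh.1⟩) hm0 (by omega)
              rw [← hds, hrec]
              simp [hm0, hple, hsle]
              apply anyCongr
              intro d' hd'
              rw [PySem.List.mem_pyRange_one] at hd'
              congr 1
              by_cases hsd : goal < s + k + d'
              · have hS1 : ∃ a, (goal - s).toNat = a + 1 := ⟨(goal - s).toNat - 1, by omega⟩
                obtain ⟨a, ha⟩ := hS1
                rw [ha, gAuxA_hi goal a _ _ _ _ (by omega)]
                rw [show (goal - (s+k)).toNat + 1 = (goal - (s+k)).toNat + 1 from rfl,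
                  gAuxA_hi goal ((goal - (s+k)).toNat) _ _ _ _ (by omega)]
              · exact gAuxA_stable goal ((goal - (s+k+d')).toNat) _ _ _ _ _ _ (le_refl _)
                  (by omega) (by omega) (by omega)
          rw [hds, hcons, List.any_cons]
          rw [walk_succ_cons, if_neg hv, htail, hhead]
          congr 1
          simp [hdk]
        · -- k is not a divisor: list unchanged, head of the range contributes false
          have hds : divsFrom goal k = divsFrom goal (k+1) := by
            unfold divsFrom
            rw [hcons, List.filter_cons, if_neg (by simpa using hdk)]
          rw [hds, hcons, List.any_cons]
          rw [ihn (k+1) p s v (by omega) (by omega) hp0 hv hpg hsg hsp hmod (by rw [← hds]; exact hF)]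
          simp [hdk]

-- ===== VERDICT (by name: the statement is the Claim_ definition above) =====
theorem g_spec : Claim_equal_g := by
  intro goal p s v m _ hpre
  unfold Spec_g
  show g goal p s v m = g_alt goal p s v m
  unfold g g_alt
  by_cases hv : v = 0
  · -- both reduce to "p = goal and s = goal"
    rw [if_pos hv, show (goal - s).toNat + 2 = ((goal - s).toNat + 1) + 1 from rfl, gAuxA_succ]
    by_cases heq : p = goal ∧ s = goal
    · rw [if_pos ⟨heq.1, heq.2, hv⟩]
      simp [heq.1, heq.2]
    · rw [if_neg (by rintro ⟨h1, h2, -⟩; exact heq ⟨h1, h2⟩)]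
      have hne : (decide (p = goal) && decide (s = goal)) = false := by
        rcases Classical.em (p = goal) with h | h
        · have : ¬ s = goal := fun h2 => heq ⟨h, h2⟩
          simp [this]
        · simp [h]
      rw [hne]
      split_ifs with g2 g3 g4 g5 <;> try rfl
      exfalso
      apply g3
      refine ⟨hv, ?_⟩
      rcases Classical.em (p = goal) with h | h
      · exact Or.inr (fun h2 => heq ⟨h, h2⟩)
      · exact Or.inl h
  · rw [if_neg hv, show (goal - s).toNat + 2 = ((goal - s).toNat + 1) + 1 from rfl, gAuxA_succ,
      if_neg (by rintro ⟨-, -, h⟩; exact hv h)]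
    by_cases g2 : p > goal ∨ s > goal
    · rw [if_pos g2, if_pos (by tauto)]
    · rw [if_neg g2]
      rw [if_neg (by rintro ⟨h, -⟩; exact hv h)]
      by_cases g4 : p ≠ goal ∧ s = goal
      · rw [if_pos g4, if_pos (by tauto)]
      · rw [if_neg g4]
        by_cases g5 : PySem.Int.mod goal p ≠ 0
        · rw [if_pos g5, if_pos (by tauto)]
        · rw [if_neg g5, if_neg (by
            rintro (h | h | h | h)
            · exact g2 (Or.inl h)
            · exact g2 (Or.inr h)
            · exact g4 ⟨h.2, h.1⟩
            · exact g5 h)]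
          have hpg : p ≤ goal := by rcases not_or.1 g2 with ⟨h, -⟩; omega
          have hsg : s ≤ goal := by rcases not_or.1 g2 with ⟨-, h⟩; omega
          have hp0 : p ≠ 0 := by
            unfold Pre_g at hpre
            rcases hpre with ⟨-, h⟩ | ⟨h1, h2, h3⟩ | h | h | h | h | ⟨h, -⟩ | ⟨h, -⟩ | ⟨h, -⟩
            · exact h
            · exact absurd h3 hv
            · exact absurd (Or.inl h) g2
            · exact absurd (Or.inr h) g2
            · exact absurd h hv
            · exact absurd ⟨h.1, h.2⟩ g4
            · exact h
            · exact h
            · exact h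
          show ((PySem.List.pyRange m goal 1).any
              (fun d => decide (PySem.Int.mod goal d = 0) && gAuxA goal ((goal - s).toNat + 1) (p*d) (s+d) (v-1) d))
            = walkAux goal ((divsFrom goal m).length + (goal - s).toNat + 2) (divsFrom goal m) p s v
          by_cases hgle : goal ≤ 0
          · -- negative/zero goal: divisors are negative, every use overshoots; both sides false
            have hwf : walkAux goal ((divsFrom goal m).length + (goal - s).toNat + 2) (divsFrom goal m) p s v = false := by
              apply walk_false goal _ _ _ _ _ hv
              intro d hd
              obtain ⟨-, hd2, -⟩ := mem_divsFrom hd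
              have hdneg : d ≤ -1 := by omega
              have hpneg : p ≤ -1 := by omega
              rintro ⟨-, h2, -⟩
              nlinarith
            rw [hwf, List.any_eq_false]
            intro d hd
            rw [PySem.List.mem_pyRange_one] at hd
            have hdneg : d ≤ -1 := by omega
            have hpneg : p ≤ -1 := by omega
            rw [gAuxA_neg goal hgle ((goal - s).toNat + 1) (p*d) (s+d) (v-1) d
              (by rintro ⟨h1, -, -⟩; nlinarith)]
            simp
          · have hgpos : 0 < goal := by omega
            by_cases hgm : goal ≤ m
            · -- empty divisor loop on both sides
              rw [divsFrom_nil hgm, PySem.List.pyRange_one_eq_nil hgm]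
              simp only [List.any_nil, List.length_nil]
              rw [show (0 + (goal - s).toNat + 2) = ((goal - s).toNat + 1) + 1 from by omega]
              rw [walk_succ_nil, if_neg hv]
            · have hm1 : (1:Int) ≤ m := by
                unfold Pre_g at hpre
                rcases hpre with ⟨h, -⟩ | ⟨h1, h2, h3⟩ | h | h | h | h | ⟨-, h⟩ | ⟨-, h⟩ | ⟨-, h⟩
                · exact h
                · exact absurd h3 hv
                · exact absurd (Or.inl h) g2
                · exact absurd (Or.inr h) g2
                · exact absurd h hv
                · exact absurd ⟨h.1, h.2⟩ g4
                · exact absurd h g5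
                · exact absurd h hgm
                · omega
              exact (walk_eq goal hgpos _ ((goal - m).toNat) m p s v (le_refl _) hm1 hp0 hv
                hpg hsg (by rintro ⟨h1, h2⟩; exact g4 ⟨h2, h1⟩) (by simpa using g5) (le_refl _)).symm
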